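-- pv_equiv track=rewrite | github.com/solyarikai/Sally_sales | sofia/scripts/g2_techstack_scraper.py | is_valid_company_domain
-- ===== SOURCE A (Python) =====
-- EXCLUDED_DOMAINS = {
--     "g2.com", "capterra.com", "google.com", "linkedin.com", "facebook.com",
--     "twitter.com", "youtube.com", "instagram.com", "tiktok.com", "reddit.com",
--     "wikipedia.org", "crunchbase.com", "github.com", "medium.com",
--     "hypeauditor.com", "creatoriq.com", "traackr.com", "grin.co",
--     "upfluence.com", "modash.io", "klear.com", "onsocial.com",
--     "trustradius.com", "getapp.com", "softwareadvice.com",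
--     "producthunt.com", "techcrunch.com", "forbes.com", "businessinsider.com",
--     "hubspot.com", "salesforce.com", "mailchimp.com",
--     "amazonaws.com", "cloudfront.net", "herokuapp.com",
-- }
--
-- def is_valid_company_domain(domain: str) -> bool:
--     """Check if domain looks like a real company website."""
--     if not domain or len(domain) < 4:
--         return False
--     if any(domain.endswith(f".{exc}") or domain == exc for exc in EXCLUDED_DOMAINS):
--         return False
--     # Skip common non-company TLDs
--     if domain.endswith((".gov", ".edu", ".mil")):
--         return False
--     return True
-- ===== SOURCE B (Python) =====
-- EXCLUDED_DOMAINS = set(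
--     "g2.com capterra.com google.com linkedin.com facebook.com "
--     "twitter.com youtube.com instagram.com tiktok.com reddit.com "
--     "wikipedia.org crunchbase.com github.com medium.com "
--     "hypeauditor.com creatoriq.com traackr.com grin.co "
--     "upfluence.com modash.io klear.com onsocial.com "
--     "trustradius.com getapp.com softwareadvice.com "
--     "producthunt.com techcrunch.com forbes.com businessinsider.com "
--     "hubspot.com salesforce.com mailchimp.com "
--     "amazonaws.com cloudfront.net herokuapp.com".split()
-- )
--
-- def is_valid_company_domain(domain: str) -> bool:
--     """Check if domain looks like a real company website."""
--     if len(domain) < 4: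
--         return False
--     # peel the domain label by label from the left; every tail that starts at a
--     # dot boundary is tested against the excluded set, the last one is the TLD
--     rest = domain
--     while True:
--         if rest in EXCLUDED_DOMAINS:
--             return False
--         dot = rest.find('.')
--         if dot == -1:
--             break
--         rest = rest[dot + 1:]
--     return rest not in ("gov", "edu", "mil")
-- ===== Notes on version B (the rewrite author's own statement) =====
-- stated objective: alternative
-- what changed: B replaces A's any(endswith/==) scan over all 34 excluded entries by a loop that peels the domain label by label, testing each dot-boundary tail for set membership, and decides the gov/edu/mil TLD check from the final tail (the last label) instead of endswith.
import Mathlib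
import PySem

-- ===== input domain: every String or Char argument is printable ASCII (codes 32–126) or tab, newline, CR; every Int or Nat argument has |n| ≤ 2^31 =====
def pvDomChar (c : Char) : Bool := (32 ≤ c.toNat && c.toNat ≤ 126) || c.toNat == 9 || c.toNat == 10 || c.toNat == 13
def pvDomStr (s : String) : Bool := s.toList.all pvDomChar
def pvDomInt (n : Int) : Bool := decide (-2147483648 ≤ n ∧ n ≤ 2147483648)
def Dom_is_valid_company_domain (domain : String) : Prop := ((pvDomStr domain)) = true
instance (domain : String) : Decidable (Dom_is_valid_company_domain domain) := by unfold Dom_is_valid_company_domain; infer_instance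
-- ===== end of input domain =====

-- B peels the domain label by label (find('.') / tail loop) and tests each dot-boundary
-- tail against the excluded set, instead of A's endswith scan over every excluded entry
-- (objective: alternative).

set_option maxRecDepth 8000
set_option maxHeartbeats 1600000

-- ===== PORT A =====
-- the module-level EXCLUDED_DOMAINS set (a fixed literal; any() over it is order-independent)
def pvExcluded : List (List Char) :=
  ["g2.com".toList, "capterra.com".toList, "google.com".toList, "linkedin.com".toList,
   "facebook.com".toList, "twitter.com".toList, "youtube.com".toList, "instagram.com".toList,
   "tiktok.com".toList, "reddit.com".toList, "wikipedia.org".toList, "crunchbase.com".toList,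
   "github.com".toList, "medium.com".toList, "hypeauditor.com".toList, "creatoriq.com".toList,
   "traackr.com".toList, "grin.co".toList, "upfluence.com".toList, "modash.io".toList,
   "klear.com".toList, "onsocial.com".toList, "trustradius.com".toList, "getapp.com".toList,
   "softwareadvice.com".toList, "producthunt.com".toList, "techcrunch.com".toList,
   "forbes.com".toList, "businessinsider.com".toList, "hubspot.com".toList,
   "salesforce.com".toList, "mailchimp.com".toList, "amazonaws.com".toList,
   "cloudfront.net".toList, "herokuapp.com".toList]

def is_valid_company_domain (domain : String) : Bool :=
  let d := domain.toList
  if d.length = 0 ∨ d.length < 4 then false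
  else if pvExcluded.any (fun exc => PySem.Chars.endswith d ('.' :: exc) || d == exc) then false
  else if PySem.Chars.endswith d ".gov".toList || PySem.Chars.endswith d ".edu".toList ||
          PySem.Chars.endswith d ".mil".toList then false
  else true

-- ===== PORT B =====
-- Source B's EXCLUDED_DOMAINS: set("g2.com capterra.com … herokuapp.com".split())
def pvExcludedAlt : PySem.Set (List Char) :=
  PySem.Set.ofList (PySem.Chars.split₀
    ("g2.com capterra.com google.com linkedin.com facebook.com twitter.com youtube.com instagram.com tiktok.com reddit.com wikipedia.org crunchbase.com github.com medium.com hypeauditor.com creatoriq.com traackr.com grin.co upfluence.com modash.io klear.com onsocial.com trustradius.com getapp.com softwareadvice.com producthunt.com techcrunch.com forbes.com businessinsider.com hubspot.com salesforce.com mailchimp.com amazonaws.com cloudfront.net herokuapp.com").toList)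

-- the while-True loop of Source B: strip up to the first '.', early-return None on an
-- excluded tail, otherwise hand back the final (dot-free) tail for the TLD test
def pvWalk (rest : List Char) : Option (List Char) :=
  if PySem.Set.contains pvExcludedAlt rest then none
  else
    let dot := PySem.Chars.find rest ['.']
    if dot = -1 then some rest
    else pvWalk (PySem.Chars.slice rest (some (dot + 1)) none)
termination_by rest.length
decreasing_by
  rename_i hdot
  have h0 : (0 : Int) ≤ PySem.Chars.find rest ['.'] := by
    have := PySem.Chars.neg_one_le_find rest ['.']
    omega
  have hinf : ['.'] <:+: rest := (PySem.Chars.find_nonneg_iff rest ['.']).mp h0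
  have hne : rest ≠ [] := by
    rintro rfl
    rcases hinf with ⟨a, b, h⟩
    simpa using congrArg List.length h
  have hcast : PySem.Chars.find rest ['.'] + 1
      = (((PySem.Chars.find rest ['.']).toNat + 1 : Nat) : Int) := by omega
  simp only [PySem.Chars.slice_eq_listSlice, hcast, PySem.List.slice_from_natCast,
    List.length_drop]
  have : 0 < rest.length := List.length_pos_iff.mpr hne
  omega

def is_valid_company_domain_alt (domain : String) : Bool :=
  let d := domain.toList
  if d.length < 4 then false
  else
    match pvWalk d with
    | none => false
    | some rest => !(["gov".toList, "edu".toList, "mil".toList].contains rest)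

-- ===== PRECONDITION & SPEC =====
def Spec_is_valid_company_domain (domain : String) (out : Bool) : Prop := out = is_valid_company_domain_alt domain
instance (domain : String) (out : Bool) : Decidable (Spec_is_valid_company_domain domain out) := by unfold Spec_is_valid_company_domain; infer_instance

-- ===== CLAIM (what is proved, stated in full; the proofs are below) =====
def Claim_equal_is_valid_company_domain : Prop := ∀ (domain : String), Dom_is_valid_company_domain domain → Spec_is_valid_company_domain domain (is_valid_company_domain domain)

-- ===== LEMMAS AND PROOFS =====

-- the two excluded-set literals hold the same strings
set_option maxRecDepth 100000 in
set_option maxHeartbeats 2000000 in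
lemma pvExcludedAlt_eq : pvExcludedAlt = pvExcluded := by decide

-- every excluded entry is nonempty
lemma pvExcluded_ne_nil : ∀ exc ∈ pvExcluded, exc ≠ [] := by decide

-- "some dot-boundary tail of d is excluded"
def BadDom (d : List Char) : Prop :=
  ∃ i, i ≤ d.length ∧ (i = 0 ∨ d.getD (i - 1) ' ' = '.') ∧ d.drop i ∈ pvExcluded

lemma drop_eq_dot_cons (d : List Char) (k : Nat) (hk : k < d.length)
    (h : d.getD k ' ' = '.') : d.drop k = '.' :: d.drop (k + 1) := by
  rw [List.drop_eq_getElem_cons hk]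
  rw [List.getD_eq_getElem d ' ' hk] at h
  rw [h]

-- A's any(endswith/==) scan holds exactly on BadDom
lemma A_scan_iff (d : List Char) :
    (pvExcluded.any (fun exc => PySem.Chars.endswith d ('.' :: exc) || d == exc) = true)
    ↔ BadDom d := by
  simp only [List.any_eq_true, PySem.Chars.endswith, List.isSuffixOf_iff_suffix,
    Bool.or_eq_true, beq_iff_eq, BadDom]
  constructor
  · rintro ⟨exc, hmem, hcase⟩
    rcases hcase with ⟨t, ht⟩ | heq
    · have hlen : d.length = t.length + 1 + exc.length := by
        rw [← ht]; simp only [List.length_append, List.length_cons]; omega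
      refine ⟨t.length + 1, by omega, Or.inr ?_, ?_⟩
      · rw [← ht]; simp
      · rw [← ht, show t ++ '.' :: exc = (t ++ ['.']) ++ exc by simp,
           show t.length + 1 = (t ++ ['.']).length by simp, List.drop_left]
        exact hmem
    · exact ⟨0, by omega, Or.inl rfl, by simpa [heq] using hmem⟩
  · rintro ⟨i, hi, hdot, hmem⟩
    by_cases h0 : i = 0
    · subst h0
      exact ⟨d, by simpa using hmem, Or.inr rfl⟩
    · have hlt : i - 1 < d.length := by
        have h1 : d.drop i ≠ [] := pvExcluded_ne_nil _ hmem
        have h2 := List.length_pos_iff.mpr h1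
        simp only [List.length_drop] at h2
        omega
      have hget : d.getD (i - 1) ' ' = '.' := hdot.resolve_left h0
      refine ⟨d.drop i, hmem, Or.inl ⟨d.take (i - 1), ?_⟩⟩
      have hi' : i - 1 + 1 = i := by omega
      calc d.take (i - 1) ++ '.' :: d.drop i
          = d.take (i - 1) ++ d.drop (i - 1) := by
            rw [drop_eq_dot_cons d (i - 1) hlt hget, hi']
        _ = d := List.take_append_drop _ _

-- a dot-free tail preceded by a dot is unique
lemma dotless_tail_unique {a b u v : List Char}
    (h : a ++ '.' :: u = b ++ '.' :: v) (hu : '.' ∉ u) (hv : '.' ∉ v) : u = v := by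
  have key : ∀ (a b u v : List Char), a ++ '.' :: u = b ++ '.' :: v → '.' ∉ u →
      a.length < b.length → False := by
    intro a b u v h hu hlen
    have h1 : (a ++ '.' :: u).drop (a.length + 1) = u := by
      rw [show a.length + 1 = (a ++ ['.']).length by simp,
          show a ++ '.' :: u = (a ++ ['.']) ++ u by simp, List.drop_left]
    have h2 : (b ++ '.' :: v).drop b.length = '.' :: v := by
      rw [List.drop_left]
    have h3 : u.drop (b.length - (a.length + 1)) = '.' :: v := by
      rw [← h1, List.drop_drop,
          show a.length + 1 + (b.length - (a.length + 1)) = b.length by omega, h, h2]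
    exact hu (by rw [← List.take_append_drop (b.length - (a.length + 1)) u, h3]; simp)
  rcases lt_trichotomy a.length b.length with hl | hl | hl
  · exact absurd (key a b u v h hu hl) id
  · have hd := congrArg (List.drop a.length) h
    rw [List.drop_left, hl, List.drop_left] at hd
    exact (List.cons.injEq _ _ _ _ ▸ hd).2
  · exact absurd (key b a v u h.symm hv hl) id

lemma nil_not_mem_pvExcluded : ([] : List Char) ∉ pvExcluded := by decide

-- pvWalk returns none exactly on BadDom, and otherwise the dot-free final tail
lemma pvWalk_spec : ∀ n (d : List Char), d.length ≤ n →
    (pvWalk d = none ↔ BadDom d) ∧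
    (∀ t, pvWalk d = some t → '.' ∉ t ∧ (t = d ∨ ∃ p, d = p ++ '.' :: t)) := by
  intro n
  induction n with
  | zero =>
    intro d hd
    have hdnil : d = [] := List.length_eq_zero_iff.mp (by omega)
    subst hdnil
    have hw : pvWalk [] = some [] := by
      rw [pvWalk]
      have hc : PySem.Set.contains pvExcludedAlt ([] : List Char) = false := by
        rw [pvExcludedAlt_eq]
        simp only [Bool.eq_false_iff, ne_eq, PySem.Set.contains_iff]
        exact nil_not_mem_pvExcluded
      rw [hc]
      have hf : PySem.Chars.find ([] : List Char) ['.'] = -1 :=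
        (PySem.Chars.find_eq_neg_one_iff _ _).mpr (by
          rintro ⟨x, y, hxy⟩
          simpa using congrArg List.length hxy)
      simp [hf]
    refine ⟨⟨fun h => absurd (h ▸ hw) (by simp), ?_⟩, fun t ht => ?_⟩
    · rintro ⟨i, hi, _, hmem⟩
      simp only [List.length_nil, Nat.le_zero] at hi
      subst hi
      exact absurd (by simpa using hmem) nil_not_mem_pvExcluded
    · rw [hw] at ht
      cases ht
      exact ⟨by simp, Or.inl rfl⟩
  | succ n ih =>
    intro d hd
    rw [pvWalk]
    by_cases hmem : PySem.Set.contains pvExcludedAlt d = true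
    · have hdm : d ∈ pvExcluded := by
        rw [pvExcludedAlt_eq] at hmem
        exact (PySem.Set.contains_iff _ _).mp hmem
      rw [if_pos hmem]
      exact ⟨⟨fun _ => ⟨0, by omega, Or.inl rfl, by simpa using hdm⟩, fun _ => rfl⟩,
             fun t ht => by simp at ht⟩
    · rw [Bool.not_eq_true] at hmem
      rw [hmem, if_neg (by simp : ¬ (false = true))]
      have hdnot : d ∉ pvExcluded := by
        intro h
        rw [pvExcludedAlt_eq] at hmem
        rw [(PySem.Set.contains_iff _ _).mpr h] at hmem
        exact Bool.noConfusion hmem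
      by_cases hdot : PySem.Chars.find d ['.'] = -1
      · rw [if_pos hdot]
        have hnodot : ¬ ['.'] <:+: d := (PySem.Chars.find_eq_neg_one_iff _ _).mp hdot
        have hnomem : '.' ∉ d := fun h => hnodot (by
          rcases List.append_of_mem h with ⟨x, y, rfl⟩
          exact ⟨x, y, by simp⟩)
        refine ⟨⟨fun h => by simp at h, ?_⟩, fun t ht => ?_⟩
        · rintro ⟨i, hi, hcase, hmem'⟩
          exfalso
          by_cases h0 : i = 0
          · subst h0
            exact hdnot (by simpa using hmem')
          · have hget : d.getD (i - 1) ' ' = '.' := hcase.resolve_left h0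
            have hlt : i - 1 < d.length := by
              have h1 : d.drop i ≠ [] := pvExcluded_ne_nil _ hmem'
              have h2 := List.length_pos_iff.mpr h1
              simp only [List.length_drop] at h2
              omega
            rw [List.getD_eq_getElem d ' ' hlt] at hget
            exact hnomem (hget ▸ List.getElem_mem hlt)
        · have ht' : d = t := by simpa using ht
          subst ht'
          exact ⟨hnomem, Or.inl rfl⟩
      · rw [if_neg hdot]
        set k := (PySem.Chars.find d ['.']).toNat with hk
        have h0 : (0 : Int) ≤ PySem.Chars.find d ['.'] := by
          have := PySem.Chars.neg_one_le_find d ['.']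
          omega
        have hpre : ['.'] <+: d.drop k := (PySem.Chars.find_spec h0).1
        have hklt : k < d.length := by
          rcases hpre with ⟨s, hs⟩
          have := congrArg List.length hs
          simp only [List.length_append, List.length_cons, List.length_nil,
            List.length_drop] at this
          omega
        have hgetk : d.getD k ' ' = '.' := by
          rcases hpre with ⟨s, hs⟩
          have h5 : d[k]'hklt :: d.drop (k + 1) = '.' :: s := by
            rw [← List.drop_eq_getElem_cons hklt, ← hs]
            rfl
          rw [List.getD_eq_getElem d ' ' hklt]
          exact (List.cons_eq_cons.mp h5).1
        have hmin := (PySem.Chars.find_spec h0).2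
        have hnodotk : ∀ i, i < k → d.getD i ' ' ≠ '.' := by
          intro i hik hgi
          have hilt : i < d.length := by omega
          exact hmin i hik ⟨d.drop (i + 1), (drop_eq_dot_cons d i hilt hgi).symm⟩
        have hcast : PySem.Chars.find d ['.'] + 1 = ((k + 1 : Nat) : Int) := by omega
        have hslice : PySem.Chars.slice d (some (PySem.Chars.find d ['.'] + 1)) none
            = d.drop (k + 1) := by
          rw [PySem.Chars.slice_eq_listSlice, hcast, PySem.List.slice_from_natCast]
        rw [hslice]
        have hlen' : (d.drop (k + 1)).length ≤ n := by
          simp only [List.length_drop]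
          omega
        obtain ⟨ihnone, ihsome⟩ := ih (d.drop (k + 1)) hlen'
        constructor
        · rw [ihnone]
          constructor
          · rintro ⟨i, hi, hcase, hmem'⟩
            refine ⟨k + 1 + i, ?_, Or.inr ?_, ?_⟩
            · simp only [List.length_drop] at hi; omega
            · by_cases hi0 : i = 0
              · subst hi0
                rw [show k + 1 + 0 - 1 = k by omega]
                exact hgetk
              · have hget := hcase.resolve_left hi0
                rw [List.getD_eq_getElem?_getD, List.getElem?_drop] at hget
                rw [List.getD_eq_getElem?_getD,
                    show k + 1 + i - 1 = k + 1 + (i - 1) by omega]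
                exact hget
            · rwa [List.drop_drop] at hmem'
          · rintro ⟨i, hi, hcase, hmem'⟩
            have hik : k + 1 ≤ i := by
              rcases hcase with rfl | hget
              · exact absurd (by simpa using hmem') hdnot
              · by_cases hi0 : i = 0
                · subst hi0
                  exact absurd (by simpa using hmem') hdnot
                · by_contra hik
                  exact hnodotk (i - 1) (by omega) hget
            refine ⟨i - (k + 1), ?_, ?_, ?_⟩
            · simp only [List.length_drop]; omega
            · by_cases hieq : i = k + 1
              · exact Or.inl (by omega)
              · refine Or.inr ?_
                have hget : d.getD (i - 1) ' ' = '.' := hcase.resolve_left (by omega)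
                rw [List.getD_eq_getElem?_getD, List.getElem?_drop,
                    show k + 1 + (i - (k + 1) - 1) = i - 1 by omega]
                rw [List.getD_eq_getElem?_getD] at hget
                exact hget
            · rw [List.drop_drop, show k + 1 + (i - (k + 1)) = i by omega]
              exact hmem'
        · intro t ht
          obtain ⟨hnod, hcase⟩ := ihsome t ht
          refine ⟨hnod, Or.inr ?_⟩
          rcases hcase with heq | ⟨p, hp⟩
          · refine ⟨d.take k, ?_⟩
            rw [heq]
            calc d = d.take k ++ d.drop k := (List.take_append_drop _ _).symm
              _ = d.take k ++ '.' :: d.drop (k + 1) := by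
                  rw [drop_eq_dot_cons d k hklt hgetk]
          · refine ⟨d.take (k + 1) ++ p, ?_⟩
            rw [List.append_assoc, ← hp, List.take_append_drop]

-- the TLD test: under the tail shape invariant, d.endswith('.'+e) is t = e
lemma tail_eq_iff (d t e : List Char) (hnod : '.' ∉ t) (hnode : '.' ∉ e)
    (hshape : t = d ∨ ∃ p, d = p ++ '.' :: t) (hlen : e.length + 1 ≤ d.length) :
    (PySem.Chars.endswith d ('.' :: e) = true) ↔ t = e := by
  simp only [PySem.Chars.endswith, List.isSuffixOf_iff_suffix]
  constructor
  · rintro ⟨q, hq⟩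
    rcases hshape with rfl | ⟨p, hp⟩
    · exact absurd (by rw [← hq]; simp : ('.' : Char) ∈ t) hnod
    · exact dotless_tail_unique (hp.symm.trans hq.symm) hnod hnode
  · rintro rfl
    rcases hshape with rfl | ⟨p, hp⟩
    · omega
    · exact ⟨p, hp.symm⟩

-- ===== VERDICT (by name: the statement is the Claim_ definition above) =====
theorem is_valid_company_domain_spec : Claim_equal_is_valid_company_domain := by
  intro domain _
  unfold Spec_is_valid_company_domain is_valid_company_domain is_valid_company_domain_alt
  set d := domain.toList with hd
  by_cases hlen : d.length < 4
  · simp [hlen]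
  · rw [if_neg (by omega : ¬ (d.length = 0 ∨ d.length < 4)), if_neg hlen]
    obtain ⟨hnone, hsome⟩ := pvWalk_spec d.length d le_rfl
    cases hw : pvWalk d with
    | none =>
      rw [if_pos ((A_scan_iff d).mpr (hnone.mp hw))]
    | some t =>
      have hnbad : ¬ BadDom d := fun hb => by
        rw [hnone.mpr hb] at hw
        simp at hw
      rw [if_neg (fun h => hnbad ((A_scan_iff d).mp h))]
      obtain ⟨hnod, hshape⟩ := hsome t hw
      have hgov := tail_eq_iff d t "gov".toList hnod (by decide) hshape (by simp; omega)
      have hedu := tail_eq_iff d t "edu".toList hnod (by decide) hshape (by simp; omega)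
      have hmil := tail_eq_iff d t "mil".toList hnod (by decide) hshape (by simp; omega)
      have hsplit : (".gov".toList = '.' :: "gov".toList) ∧
          (".edu".toList = '.' :: "edu".toList) ∧ (".mil".toList = '.' :: "mil".toList) := by
        decide
      rw [hsplit.1, hsplit.2.1, hsplit.2.2]
      by_cases hg : t = "gov".toList
      · subst hg
        rw [hgov.mpr rfl]
        simp only [Bool.true_or, if_true]
        decide
      · have h1 : PySem.Chars.endswith d ('.' :: "gov".toList) = false :=
          Bool.eq_false_iff.mpr (fun h => hg (hgov.mp h))
        by_cases he : t = "edu".toList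
        · subst he
          rw [h1, hedu.mpr rfl]
          simp only [Bool.false_or, Bool.true_or, if_true]
          decide
        · have h2 : PySem.Chars.endswith d ('.' :: "edu".toList) = false :=
            Bool.eq_false_iff.mpr (fun h => he (hedu.mp h))
          by_cases hm : t = "mil".toList
          · subst hm
            rw [h1, h2, hmil.mpr rfl]
            decide
          · have h3 : PySem.Chars.endswith d ('.' :: "mil".toList) = false :=
              Bool.eq_false_iff.mpr (fun h => hm (hmil.mp h))
            rw [h1, h2, h3]
            simp only [Bool.or_self, if_false, Bool.false_eq_true]
            have hct : (["gov".toList, "edu".toList, "mil".toList].contains t) = false := by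
              simp only [List.contains_cons, List.contains_nil, Bool.or_eq_false_iff,
                beq_eq_false_iff_ne, ne_eq]
              exact ⟨fun h => hg h, fun h => he h, fun h => hm h, trivial⟩
            rw [hct]
            decide
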